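-- pv_equiv track=rewrite | github.com/sda97ghb/pisaka-demo-01 | src/pisaka/app/articles/slug.py | is_valid_slug
-- ===== SOURCE A (Python) =====
-- numbers = "0123456789"
--
-- english_letters = "abcdefghijklmnopqrstuvwxyz"
--
-- def is_valid_slug(slug: str) -> bool:
--     if not slug:
--         return False
--     for letter in slug:
--         if letter == "-":
--             continue
--         if letter in numbers:
--             continue
--         if letter in english_letters:
--             continue
--         return False
--     return True
-- ===== SOURCE B (Python) =====
-- import re
--
-- _SLUG_RE = re.compile(r"[a-z0-9-]+")
--
-- def is_valid_slug(slug: str) -> bool: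
--     return bool(_SLUG_RE.fullmatch(slug))
-- ===== Notes on version B (the rewrite author's own statement) =====
-- stated objective: idiomatic
-- what changed: Replaced the explicit per-character loop with early return by a single precompiled regex fullmatch against [a-z0-9-]+.
import Mathlib
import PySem

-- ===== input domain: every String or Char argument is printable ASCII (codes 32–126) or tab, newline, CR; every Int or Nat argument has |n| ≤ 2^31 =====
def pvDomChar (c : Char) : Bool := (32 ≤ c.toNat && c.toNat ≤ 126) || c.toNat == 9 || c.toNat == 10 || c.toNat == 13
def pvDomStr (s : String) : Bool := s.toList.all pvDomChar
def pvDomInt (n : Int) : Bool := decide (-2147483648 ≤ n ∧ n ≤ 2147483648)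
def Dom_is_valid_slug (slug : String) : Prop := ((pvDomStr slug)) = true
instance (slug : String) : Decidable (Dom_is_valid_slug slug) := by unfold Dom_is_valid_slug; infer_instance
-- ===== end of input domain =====

-- B replaces A's explicit per-character loop with early return by a regex fullmatch
-- against [a-z0-9-]+ (ported as: nonempty ∧ every char in the class); idiomatic, same cost.

-- ===== PORT A =====
def pvNumbers : String := "0123456789"

def pvEnglishLetters : String := "abcdefghijklmnopqrstuvwxyz"

-- the for-loop over the slug's characters; 'letter in numbers' is single-char
-- membership in the constant string, ported exactly as membership in its char list
def slugLoopA : List Char → Bool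
  | [] => true
  | letter :: rest =>
    if letter == '-' then slugLoopA rest
    else if pvNumbers.toList.contains letter then slugLoopA rest
    else if pvEnglishLetters.toList.contains letter then slugLoopA rest
    else false

def is_valid_slug (slug : String) : Bool :=
  if slug.toList.isEmpty then false
  else slugLoopA slug.toList

-- ===== PORT B =====
-- the regex character class [a-z0-9-]
def slugClassChar (c : Char) : Bool :=
  ('a' ≤ c && c ≤ 'z') || ('0' ≤ c && c ≤ '9') || c == '-'

-- fullmatch of [a-z0-9-]+ : at least one char, all chars in the class
def is_valid_slug_alt (slug : String) : Bool :=
  !slug.toList.isEmpty && slug.toList.all slugClassChar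

-- ===== PRECONDITION & SPEC =====
def Spec_is_valid_slug (slug : String) (out : Bool) : Prop := out = is_valid_slug_alt slug
instance (slug : String) (out : Bool) : Decidable (Spec_is_valid_slug slug out) := by unfold Spec_is_valid_slug; infer_instance

-- ===== CLAIM (what is proved, stated in full; the proofs are below) =====
def Claim_equal_is_valid_slug : Prop := ∀ (slug : String), Dom_is_valid_slug slug → Spec_is_valid_slug slug (is_valid_slug slug)

-- ===== LEMMAS AND PROOFS =====

theorem digit_contains_eq (c : Char) :
    (pvNumbers.toList.contains c) = ('0' ≤ c && c ≤ '9') := by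
  have hl : pvNumbers.toList = ['0','1','2','3','4','5','6','7','8','9'] := by decide
  rw [hl]
  have hc : Char.ofNat c.toNat = c := Char.ofNat_toNat c
  by_cases h : '0' ≤ c ∧ c ≤ '9'
  · obtain ⟨h1, h2⟩ := h
    have n1 : 48 ≤ c.toNat := by simpa [Char.le_def, UInt32.le_iff_toNat_le] using h1
    have n2 : c.toNat ≤ 57 := by simpa [Char.le_def, UInt32.le_iff_toNat_le] using h2
    interval_cases h : c.toNat <;> rw [← hc] <;> decide
  · have hm : c ∉ ['0','1','2','3','4','5','6','7','8','9'] := by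
      intro hmem; apply h; fin_cases hmem <;> exact ⟨by decide, by decide⟩
    simp only [List.contains_eq_mem, decide_eq_false hm]
    symm
    simpa using h

theorem letter_contains_eq (c : Char) :
    (pvEnglishLetters.toList.contains c) = ('a' ≤ c && c ≤ 'z') := by
  have hl : pvEnglishLetters.toList =
      ['a','b','c','d','e','f','g','h','i','j','k','l','m',
       'n','o','p','q','r','s','t','u','v','w','x','y','z'] := by decide
  rw [hl]
  have hc : Char.ofNat c.toNat = c := Char.ofNat_toNat c
  by_cases h : 'a' ≤ c ∧ c ≤ 'z'
  · obtain ⟨h1, h2⟩ := h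
    have n1 : 97 ≤ c.toNat := by simpa [Char.le_def, UInt32.le_iff_toNat_le] using h1
    have n2 : c.toNat ≤ 122 := by simpa [Char.le_def, UInt32.le_iff_toNat_le] using h2
    interval_cases h : c.toNat <;> rw [← hc] <;> decide
  · have hm : c ∉ ['a','b','c','d','e','f','g','h','i','j','k','l','m',
       'n','o','p','q','r','s','t','u','v','w','x','y','z'] := by
      intro hmem; apply h; fin_cases hmem <;> exact ⟨by decide, by decide⟩
    simp only [List.contains_eq_mem, decide_eq_false hm]
    symm
    simpa using h

theorem slugLoopA_eq_all (l : List Char) : slugLoopA l = l.all slugClassChar := by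
  induction l with
  | nil => rfl
  | cons c rest ih =>
    simp only [slugLoopA, List.all_cons, digit_contains_eq, letter_contains_eq, slugClassChar]
    by_cases h1 : c == '-'
    · simp [h1, ih]
    · by_cases h2 : ('0' ≤ c && c ≤ '9') = true
      · simp [h1, h2, ih]
      · by_cases h3 : ('a' ≤ c && c ≤ 'z') = true
        · simp [h1, h2, h3, ih]
        · simp [h1, h2, h3]

-- ===== VERDICT (by name: the statement is the Claim_ definition above) =====
theorem is_valid_slug_spec : Claim_equal_is_valid_slug := by
  intro slug _
  unfold Spec_is_valid_slug is_valid_slug is_valid_slug_alt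
  by_cases h : slug.toList.isEmpty
  · simp [h]
  · simp [h, slugLoopA_eq_all]
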